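-- pv_equiv track=rewrite | github.com/wz1114841863/FigureSkating | alphapose/utils/jsonDataProc.py | jump_data_proc
-- ===== SOURCE A (Python) =====
-- def jump_data_proc(jump):
--     """
--     ：param jump：list
--     ：return jump_proc：list
--     """
--     length = len(jump)
--     jump_proc = [False for _ in range(length)]
--     assert len(jump_proc) == length
--     # 长度太短直接返回
--     if length < 20:
--         return jump_proc
--
--     for i in range(10, length - 10):
--         tmp = jump[i - 9: i + 9]
--         num = tmp.count(True)  # 计算True的个数
--         if num > 10:
--             jump_proc[i] = True
--         else:
--             jump_proc[i] = False
--
--     return jump_proc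
-- ===== SOURCE B (Python) =====
-- def jump_data_proc(jump):
--     length = len(jump)
--     jump_proc = [False] * length
--     assert len(jump_proc) == length
--     if length < 20:
--         return jump_proc
--     # prefix counts: P[k] = number of elements equal to True among jump[:k]
--     P = [0] * (length + 1)
--     for k, x in enumerate(jump):
--         P[k + 1] = P[k] + (1 if x == True else 0)
--     return [P[i + 9] - P[i - 9] > 10 if 10 <= i < length - 10 else False
--             for i in range(length)]
-- ===== Notes on version B (the rewrite author's own statement) =====
-- stated objective: faster
-- what changed: Replaces the per-position slice-and-count over each 18-wide window with a single prefix-count pass plus a comprehension of prefix-sum differences.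
import Mathlib
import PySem

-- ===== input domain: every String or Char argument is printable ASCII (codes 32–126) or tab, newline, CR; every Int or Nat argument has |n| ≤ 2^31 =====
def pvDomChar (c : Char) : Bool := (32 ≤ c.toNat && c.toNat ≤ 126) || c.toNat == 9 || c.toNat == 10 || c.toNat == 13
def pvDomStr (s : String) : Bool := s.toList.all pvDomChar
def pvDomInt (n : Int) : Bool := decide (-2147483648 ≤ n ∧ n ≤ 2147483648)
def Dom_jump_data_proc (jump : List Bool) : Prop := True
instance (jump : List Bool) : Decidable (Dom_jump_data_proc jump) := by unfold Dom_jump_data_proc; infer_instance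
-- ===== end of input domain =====

-- B replaces A's per-position 18-wide slice-and-count with a single prefix-count pass followed by one comprehension.

-- ===== PORT A =====
def jump_data_proc (jump : List Bool) : List Bool :=
  let length : Int := (jump.length : Int)
  let jump_proc : List Bool := List.replicate jump.length false
  if length < 20 then jump_proc
  else
    (PySem.List.pyRange 10 (length - 10) 1).foldl (fun acc i =>
      let tmp := PySem.List.slice jump (some (i - 9)) (some (i + 9))
      let num : Int := (tmp.count true : Int)
      if num > 10 then PySem.List.pySetD acc i true
      else PySem.List.pySetD acc i false) jump_proc

-- ===== PORT B =====
-- prefix-count pass of Source B: P built front-to-back (here by consing then reversing), then one comprehension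
def jump_data_proc_alt (jump : List Bool) : List Bool :=
  let n := jump.length
  let jump_proc : List Bool := List.replicate n false
  if n < 20 then jump_proc
  else
    let P : List Int :=
      (jump.foldl (fun acc x => (acc.headI + (if x == true then 1 else 0)) :: acc) [0]).reverse
    (List.range n).map (fun i =>
      if 10 ≤ i ∧ i < n - 10 then
        decide (P.getD (i + 9) 0 - P.getD (i - 9) 0 > 10)
      else false)

-- ===== PRECONDITION & SPEC =====
def Spec_jump_data_proc (jump : List Bool) (out : List Bool) : Prop := out = jump_data_proc_alt jump
instance (jump : List Bool) (out : List Bool) : Decidable (Spec_jump_data_proc jump out) := by unfold Spec_jump_data_proc; infer_instance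

-- ===== CLAIM (what is proved, stated in full; the proofs are below) =====
def Claim_equal_jump_data_proc : Prop := ∀ (jump : List Bool), Dom_jump_data_proc jump → Spec_jump_data_proc jump (jump_data_proc jump)

-- ===== LEMMAS AND PROOFS =====

def pvC (x : Bool) : Int := if x == true then 1 else 0

-- the list of running prefix counts starting from a (front-to-back)
def pvG (a : Int) : List Bool → List Int
  | [] => []
  | x :: xs => (a + pvC x) :: pvG (a + pvC x) xs

lemma pv_foldl_step (l : List Bool) (a : Int) (t : List Int) :
    l.foldl (fun acc x => (acc.headI + (if x == true then 1 else 0)) :: acc) (a :: t)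
      = (pvG a l).reverse ++ a :: t := by
  induction l generalizing a t with
  | nil => simp [pvG]
  | cons x xs ih =>
    have hs : ((a :: t).headI + (if x == true then 1 else 0)) = a + pvC x := by simp [pvC]
    rw [List.foldl_cons, hs, ih]
    simp [pvG]

lemma pvG_getD (l : List Bool) (a : Int) (k : Nat) (hk : k < l.length) :
    (pvG a l).getD k 0 = a + ((l.take (k + 1)).count true : Int) := by
  induction l generalizing a k with
  | nil => simp at hk
  | cons x xs ih =>
    cases k with
    | zero => cases x <;> simp [pvG, pvC]
    | succ m =>
      simp only [List.length_cons] at hk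
      have := ih (a + pvC x) m (by omega)
      cases x <;> simp [pvG, pvC] at * <;> omega

-- B's prefix list P at index k is the count of True among the first k elements
lemma pvP_getD (l : List Bool) (k : Nat) (hk : k ≤ l.length) :
    ((l.foldl (fun acc x => (acc.headI + (if x == true then 1 else 0)) :: acc) [0]).reverse).getD k 0
      = ((l.take k).count true : Int) := by
  have h := pv_foldl_step l 0 []
  rw [h]
  cases k with
  | zero => simp
  | succ m =>
    simp only [List.reverse_append, List.reverse_reverse, List.reverse_cons, List.reverse_nil,
      List.nil_append, List.cons_append]
    simpa using pvG_getD l 0 m (by omega)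

-- A's index-assignment loop over range(10, j) computes a map over range(n)
lemma pv_loop (p : Int → Prop) [DecidablePred p] (n : Nat) :
    ∀ j : Nat, 10 ≤ j → j ≤ n →
    (PySem.List.pyRange 10 (j : Int) 1).foldl
      (fun acc i => if p i then PySem.List.pySetD acc i true else PySem.List.pySetD acc i false)
      (List.replicate n false)
      = (List.range n).map (fun k => if 10 ≤ k ∧ k < j then decide (p (k : Int)) else false) := by
  intro j hj10
  induction j, hj10 using Nat.le_induction with
  | base =>
    intro _
    rw [PySem.List.pyRange_one_eq_nil (by norm_num)]
    refine List.ext_getElem (by simp) ?_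
    intro k h1 h2
    have : ¬ (10 ≤ k ∧ k < 10) := by omega
    simp [this]
  | succ j hj ih =>
    intro hjn
    have hcast : ((j + 1 : Nat) : Int) = (j : Int) + 1 := by push_cast; ring
    rw [hcast, PySem.List.pyRange_one_succ_right (by exact_mod_cast hj)]
    rw [List.foldl_append, ih (by omega)]
    simp only [List.foldl_cons, List.foldl_nil]
    by_cases hp : p (j : Int) <;>
    · simp only [hp, if_pos, if_neg, not_false_iff, PySem.List.pySetD_natCast]
      refine List.ext_getElem (by simp) ?_
      intro k h1 h2
      simp only [List.length_map, List.length_range] at h1 h2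
      rw [List.getElem_set]
      by_cases hk : j = k
      · subst hk
        simp [hj, hp]
      · simp only [if_neg hk, List.getElem_map, List.getElem_range]
        have : (10 ≤ k ∧ k < j) ↔ (10 ≤ k ∧ k < j + 1) := by omega
        simp [this]

-- the count over the window jump[k-9:k+9] is a difference of prefix counts
lemma pv_window (jump : List Bool) (k : Nat) (h10 : 10 ≤ k) :
    ((PySem.List.slice jump (some ((k : Int) - 9)) (some ((k : Int) + 9))).count true : Int)
      = ((jump.take (k + 9)).count true : Int) - ((jump.take (k - 9)).count true : Int) := by
  have h1 : ((k : Int) - 9) = ((k - 9 : Nat) : Int) := by omega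
  have h2 : ((k : Int) + 9) = ((k + 9 : Nat) : Int) := by omega
  rw [h1, h2, PySem.List.slice_natCast]
  have h3 : k + 9 = (k - 9) + 18 := by omega
  have h4 : (k + 9) - (k - 9) = 18 := by omega
  rw [h4, h3, List.take_add, List.count_append]
  push_cast; ring

lemma pv_main (jump : List Bool) : jump_data_proc jump = jump_data_proc_alt jump := by
  unfold jump_data_proc jump_data_proc_alt
  by_cases h : jump.length < 20
  · have hA : ((jump.length : Int)) < 20 := by exact_mod_cast h
    simp [h, hA]
  · have hA : ¬ ((jump.length : Int) < 20) := by exact_mod_cast h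
    simp only [if_neg hA, if_neg h]
    have hub : ((jump.length : Int) - 10) = ((jump.length - 10 : Nat) : Int) := by omega
    rw [hub, pv_loop (fun i => ((PySem.List.slice jump (some (i - 9)) (some (i + 9))).count true : Int) > 10)
        jump.length (jump.length - 10) (by omega) (by omega)]
    refine List.map_congr_left ?_
    intro k hk
    rw [List.mem_range] at hk
    by_cases hcond : 10 ≤ k ∧ k < jump.length - 10
    · rw [if_pos hcond, if_pos hcond]
      rw [pvP_getD jump (k + 9) (by omega), pvP_getD jump (k - 9) (by omega)]
      simp only [decide_eq_decide]
      rw [pv_window jump k (by omega)]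
    · rw [if_neg hcond, if_neg hcond]

-- ===== VERDICT (by name: the statement is the Claim_ definition above) =====
theorem jump_data_proc_spec : Claim_equal_jump_data_proc := by
  intro jump _
  exact pv_main jump
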